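-- pv_equiv track=rewrite | github.com/azrsh/emoji-count-bot | dic2text.py | convert
-- ===== SOURCE A (Python) =====
-- def convert(dic, width = 5):
--     result = ''
--     index = 0
--     for key, value in dic.items():
--         result += str(key) + ' : ' + str(value).rjust(4) + '    '
--         if index % width == width - 1:
--             result += '\n'
--         index += 1
--     return result
-- ===== SOURCE B (Python) =====
-- def _cell(key, value):
--     return str(key) + ' : ' + str(value).rjust(4) + '    '
--
-- def convert(dic, width=5):
--     items = list(dic.items())
--     if width <= 0:
--         # no positive row width: no line breaks, just the joined cells
--         return ''.join(_cell(k, v) for k, v in items)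
--     parts = []
--     while items:
--         row, items = items[:width], items[width:]
--         parts.append(''.join(_cell(k, v) for k, v in row))
--         if len(row) == width:
--             parts.append('\n')
--     return ''.join(parts)
-- ===== Notes on version B (the rewrite author's own statement) =====
-- stated objective: alternative
-- what changed: Replaces the flat fold that tests a running counter modulo width at every item with a two-level traversal that slices the item list into width-sized rows, joins each row's cells and appends a newline only after full rows; non-positive width is one plain no-newline join.
import Mathlib
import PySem

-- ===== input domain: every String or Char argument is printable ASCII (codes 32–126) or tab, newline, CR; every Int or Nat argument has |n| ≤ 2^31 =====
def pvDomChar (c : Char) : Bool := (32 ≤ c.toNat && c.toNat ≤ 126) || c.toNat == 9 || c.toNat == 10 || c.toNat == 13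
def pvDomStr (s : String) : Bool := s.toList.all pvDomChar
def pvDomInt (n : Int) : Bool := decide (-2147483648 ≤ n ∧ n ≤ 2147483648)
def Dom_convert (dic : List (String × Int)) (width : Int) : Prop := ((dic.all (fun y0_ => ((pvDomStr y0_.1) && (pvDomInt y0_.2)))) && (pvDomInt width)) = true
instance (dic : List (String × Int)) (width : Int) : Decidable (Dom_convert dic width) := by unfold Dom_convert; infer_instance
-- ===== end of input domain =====

-- B restructures A's flat modulo-counter fold into a row/cell traversal over width-sized
-- slices (objective: alternative decomposition, same cost).

-- shared cell helper: str(key) + ' : ' + str(value).rjust(4) + '    '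
-- (both Pythons compute exactly this expression; rjust ported by hand, exact for default
-- space fill: pad on the left with spaces up to width 4)
def pyRjust (s : String) (n : Nat) : String :=
  String.ofList (List.replicate (n - s.toList.length) ' ') ++ s

def cellStr (kv : String × Int) : String :=
  kv.1 ++ " : " ++ pyRjust (PySem.Int.toStr kv.2) 4 ++ "    "

-- ===== PORT A =====
-- loop body: result += cell; if index % width == width - 1: result += '\n'; index += 1
def stepA (width : Int) (st : String × Int) (kv : String × Int) : String × Int :=
  let r := st.1 ++ cellStr kv
  let r := if PySem.Int.mod st.2 width = width - 1 then r ++ "\n" else r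
  (r, st.2 + 1)

def convert (dic : List (String × Int)) (width : Int) : String :=
  (dic.foldl (stepA width) ("", 0)).1

-- ===== PORT B =====
-- ''.join(_cell(k, v) for k, v in items)
def joinCells (items : List (String × Int)) : String :=
  String.join (items.map cellStr)

-- the while loop of Source B: slice off a width-sized row, join its cells, newline after full rows.
-- w = width.toNat is faithful: this is only called under the width > 0 branch; the w = 0
-- match arm is a totality guard only (unreachable from convert_alt).
def rowsB (items : List (String × Int)) (w : Nat) (parts : List String) : List String :=
  if h : items = [] ∨ w = 0 then parts
  else
    let row := items.take w
    let parts1 := parts ++ [joinCells row]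
    let parts2 := if row.length = w then parts1 ++ ["\n"] else parts1
    rowsB (items.drop w) w parts2
termination_by items.length
decreasing_by
  rcases not_or.mp h with ⟨h1, h2⟩
  have := List.length_pos_of_ne_nil h1
  simp only [List.length_drop]
  omega

def convert_alt (dic : List (String × Int)) (width : Int) : String :=
  if width ≤ 0 then joinCells dic
  else String.join (rowsB dic width.toNat [])

-- ===== PRECONDITION & SPEC =====
-- Pre_ excludes exactly the inputs where A raises ZeroDivisionError (width == 0 with a
-- non-empty dict, from 'index % width').
def Pre_convert (dic : List (String × Int)) (width : Int) : Prop := width ≠ 0 ∨ dic = []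
instance (dic : List (String × Int)) (width : Int) : Decidable (Pre_convert dic width) := by unfold Pre_convert; infer_instance

def pvWitness_convert : (List (String × Int)) × Int := ([("a", 1), ("bc", -23)], 2)

def Spec_convert (dic : List (String × Int)) (width : Int) (out : String) : Prop := out = convert_alt dic width
instance (dic : List (String × Int)) (width : Int) (out : String) : Decidable (Spec_convert dic width out) := by unfold Spec_convert; infer_instance

-- ===== CLAIM (what is proved, stated in full; the proofs are below) =====
def Claim_equal_convert : Prop := ∀ (dic : List (String × Int)) (width : Int), Dom_convert dic width → Pre_convert dic width → Spec_convert dic width (convert dic width)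

-- ===== LEMMAS AND PROOFS =====

theorem strFoldl_prefix : ∀ (l : List String) (a b : String),
    l.foldl (· ++ ·) (a ++ b) = a ++ l.foldl (· ++ ·) b := by
  intro l
  induction l with
  | nil => intro a b; simp
  | cons x xs ih => intro a b; simpa [String.append_assoc] using ih a (b ++ x)

theorem strJoin_cons (s : String) (l : List String) :
    String.join (s :: l) = s ++ String.join l := by
  show l.foldl (· ++ ·) ("" ++ s) = s ++ l.foldl (· ++ ·) ""
  have : ("" : String) ++ s = s ++ "" := by simp
  rw [this, strFoldl_prefix]

theorem strJoin_append (a b : List String) :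
    String.join (a ++ b) = String.join a ++ String.join b := by
  induction a with
  | nil => simp [String.join]
  | cons x xs ih => simp [strJoin_cons, ih, String.append_assoc]

theorem stepA_eq (width : Int) (st : String × Int) (kv : String × Int) :
    stepA width st kv =
      (st.1 ++ (cellStr kv ++ (if PySem.Int.mod st.2 width = width - 1 then "\n" else "")), st.2 + 1) := by
  simp only [stepA]
  split_ifs <;> simp [String.append_assoc]

-- the accumulated string is a prefix
theorem foldA_fst_append (width : Int) :
    ∀ (items : List (String × Int)) (r : String) (j : Int),
      (items.foldl (stepA width) (r, j)).1 = r ++ (items.foldl (stepA width) ("", j)).1 := by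
  intro items
  induction items with
  | nil => intro r j; simp
  | cons kv tl ih =>
    intro r j
    simp only [List.foldl_cons, stepA_eq]
    rw [ih, ih ((("":String) ++ _))]
    simp [String.append_assoc]

theorem foldA_snd (width : Int) :
    ∀ (items : List (String × Int)) (r : String) (j : Int),
      (items.foldl (stepA width) (r, j)).2 = j + items.length := by
  intro items
  induction items with
  | nil => intro r j; simp
  | cons kv tl ih =>
    intro r j
    simp only [List.foldl_cons, stepA_eq, ih, List.length_cons]
    push_cast; omega

-- negative width: index % width lies in (width, 0], never equals width - 1, so no newlines
theorem foldA_neg (width : Int) (hw : width < 0) :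
    ∀ (items : List (String × Int)) (r : String) (j : Int),
      (items.foldl (stepA width) (r, j)).1 = r ++ joinCells items := by
  intro items
  induction items with
  | nil => intro r j; simp [joinCells, String.join]
  | cons kv tl ih =>
    intro r j
    have hb := PySem.Int.mod_neg_bounds (a := j) hw
    have hne : PySem.Int.mod j width ≠ width - 1 := by omega
    simp only [List.foldl_cons, stepA_eq, if_neg hne]
    rw [ih]
    simp [joinCells, strJoin_cons, String.append_assoc]

-- a run of indices strictly below width - 1: no newlines
theorem foldA_partial (width : Int) (hw : 0 < width) :
    ∀ (items : List (String × Int)) (r : String) (j : Int),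
      0 ≤ j → j + items.length < width →
      (items.foldl (stepA width) (r, j)).1 = r ++ joinCells items := by
  intro items
  induction items with
  | nil => intro r j _ _; simp [joinCells, String.join]
  | cons kv tl ih =>
    intro r j hj hlt
    have hjw : j < width := by simp at hlt; omega
    have hmod : PySem.Int.mod j width = j := by
      rw [PySem.Int.mod_eq_emod_of_pos hw, Int.emod_eq_of_lt hj hjw]
    have hne : PySem.Int.mod j width ≠ width - 1 := by
      rw [hmod]; simp at hlt; omega
    simp only [List.foldl_cons, stepA_eq, if_neg hne]
    rw [ih _ (j + 1) (by omega) (by simp at hlt ⊢; omega)]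
    simp [joinCells, strJoin_cons, String.append_assoc]

-- shifting the starting index by width does not change the output
theorem foldA_shift (width : Int) (hw : 0 < width) :
    ∀ (items : List (String × Int)) (r : String) (j : Int),
      (items.foldl (stepA width) (r, j + width)).1 = (items.foldl (stepA width) (r, j)).1 := by
  intro items
  induction items with
  | nil => intro r j; simp
  | cons kv tl ih =>
    intro r j
    have hmod : PySem.Int.mod (j + width) width = PySem.Int.mod j width := by
      rw [PySem.Int.mod_eq_emod_of_pos hw, PySem.Int.mod_eq_emod_of_pos hw]
      simpa using Int.add_mul_emod_self_left (a := j) (b := width) (c := 1)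
    simp only [List.foldl_cons, stepA_eq, hmod]
    have : j + width + 1 = (j + 1) + width := by ring
    rw [this, ih]

theorem joinCells_append (a b : List (String × Int)) :
    joinCells (a ++ b) = joinCells a ++ joinCells b := by
  simp [joinCells, List.map_append, strJoin_append]

-- a full chunk of exactly width items starting at index 0 produces its cells plus '\n'
theorem foldA_full (width : Int) (hw : 0 < width)
    (items : List (String × Int)) (hlen : (items.length : Int) = width) (r : String) :
    (items.foldl (stepA width) (r, 0)).1 = r ++ joinCells items ++ "\n" := by
  have hne : items ≠ [] := by
    intro h; subst h; simp at hlen; omega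
  obtain ⟨front, last, rfl⟩ : ∃ f l, items = f ++ [l] :=
    ⟨items.dropLast, items.getLast hne, (List.dropLast_concat_getLast hne).symm⟩
  rw [List.foldl_append]
  have hfl : (front.length : Int) = width - 1 := by
    simp at hlen; push_cast; omega
  have hsnd : ((front.foldl (stepA width) (r, 0)).2) = width - 1 := by
    rw [foldA_snd]; omega
  have hfst := foldA_partial width hw front r 0 le_rfl (by omega)
  have : front.foldl (stepA width) (r, 0) = (r ++ joinCells front, width - 1) := by
    exact Prod.ext_iff.mpr ⟨hfst, hsnd⟩
  rw [this]
  have hmod : PySem.Int.mod (width - 1) width = width - 1 := by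
    rw [PySem.Int.mod_eq_emod_of_pos hw, Int.emod_eq_of_lt (by omega) (by omega)]
  simp only [List.foldl_cons, List.foldl_nil, stepA_eq, hmod, if_pos rfl]
  rw [joinCells_append]
  have hsingle : joinCells [last] = cellStr last := by
    simp only [joinCells, List.map_cons, List.map_nil, strJoin_cons]
    simp [String.join]
  rw [hsingle]
  simp [String.append_assoc]

theorem rowsB_nil (w : Nat) (parts : List String) : rowsB [] w parts = parts := by
  rw [rowsB]; simp

theorem rowsB_step (items : List (String × Int)) (w : Nat) (parts : List String)
    (h1 : items ≠ []) (h2 : w ≠ 0) :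
    rowsB items w parts =
      rowsB (items.drop w) w
        (if (items.take w).length = w
          then (parts ++ [joinCells (items.take w)]) ++ ["\n"]
          else parts ++ [joinCells (items.take w)]) := by
  rw [rowsB, dif_neg (by rintro (h | h); exacts [h1 h, h2 h])]

theorem rowsB_acc (w : Nat) :
    ∀ (n : Nat) (items : List (String × Int)), items.length = n → ∀ (p q : List String),
      rowsB items w (p ++ q) = p ++ rowsB items w q := by
  intro n
  induction n using Nat.strong_induction_on with
  | _ n ih =>
    intro items hn p q
    by_cases h1 : items = []
    · subst h1; rw [rowsB_nil, rowsB_nil]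
    · by_cases h2 : w = 0
      · subst h2
        rw [rowsB, dif_pos (Or.inr rfl), rowsB, dif_pos (Or.inr rfl)]
      · have hpos := List.length_pos_of_ne_nil h1
        have hdrop : (items.drop w).length < n := by
          simp only [List.length_drop]; omega
        rw [rowsB_step _ _ _ h1 h2, rowsB_step _ _ _ h1 h2]
        split_ifs with hrow <;>
          (simp only [List.append_assoc]; exact ih _ hdrop _ rfl _ _)

-- main positive-width lemma: chunk induction
theorem foldA_pos (width : Int) (hw : 0 < width) :
    ∀ (n : Nat) (items : List (String × Int)), items.length = n →
      (items.foldl (stepA width) ("", 0)).1 = String.join (rowsB items width.toNat []) := by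
  intro n
  induction n using Nat.strong_induction_on with
  | _ n ih =>
    intro items hn
    set w : Nat := width.toNat with hwdef
    have hw0 : 0 < w := by omega
    by_cases hnil : items = []
    · subst hnil; rw [rowsB_nil]; simp [String.join]
    · have hpos := List.length_pos_of_ne_nil hnil
      rw [rowsB_step _ _ _ hnil (by omega)]
      by_cases hlt : items.length < w
      · -- trailing partial row: no newline, recursion ends on []
        have htake : items.take w = items := List.take_of_length_le (by omega)
        have hdropnil : items.drop w = [] := List.drop_eq_nil_of_le (by omega)
        rw [htake, hdropnil, if_neg (by omega), rowsB_nil]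
        rw [foldA_partial width hw items "" 0 le_rfl (by push_cast; omega)]
        simp [strJoin_cons, String.join]
      · -- full row of exactly w items, then the rest
        have htlen : (items.take w).length = w := by simp; omega
        have hdlen : (items.drop w).length < n := by simp [List.length_drop]; omega
        rw [htlen, if_pos rfl]
        conv_lhs => rw [← List.take_append_drop w items]
        rw [List.foldl_append]
        have hfull : (items.take w).foldl (stepA width) ("", 0)
            = ("" ++ joinCells (items.take w) ++ "\n", width) := by
          have hfst := foldA_full width hw (items.take w) (by rw [htlen]; omega) ""
          have hsnd : (((items.take w).foldl (stepA width) ("", 0)).2) = width := by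
            rw [foldA_snd]; rw [htlen]; omega
          exact Prod.ext_iff.mpr ⟨hfst, hsnd⟩
        rw [hfull]
        have hshift : ((items.drop w).foldl (stepA width)
              ("" ++ joinCells (items.take w) ++ "\n", width)).1
            = ((items.drop w).foldl (stepA width)
              ("" ++ joinCells (items.take w) ++ "\n", 0)).1 := by
          have := foldA_shift width hw (items.drop w)
            ("" ++ joinCells (items.take w) ++ "\n") 0
          simpa using this
        rw [hshift, foldA_fst_append, ih _ hdlen _ rfl]
        have hacc : rowsB (items.drop w) w (([] ++ [joinCells (items.take w)]) ++ ["\n"])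
            = [joinCells (items.take w), "\n"] ++ rowsB (items.drop w) w [] := by
          have := rowsB_acc w (items.drop w).length (items.drop w) rfl
            [joinCells (items.take w), "\n"] []
          simpa using this
        rw [hacc]
        simp [strJoin_cons, String.append_assoc]

-- ===== VERDICT (by name: the statement is the Claim_ definition above) =====
theorem convert_spec : Claim_equal_convert := by
  intro dic width _ hpre
  unfold Spec_convert convert convert_alt
  rcases lt_trichotomy width 0 with hw | hw | hw
  · rw [if_pos (le_of_lt hw), foldA_neg width hw dic "" 0]
    simp
  · subst hw
    rcases hpre with h | h
    · exact absurd rfl h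
    · subst h; simp [joinCells, String.join]
  · rw [if_neg (by omega)]
    exact foldA_pos width hw dic.length dic rfl
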